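-- pv_equiv track=rewrite | github.com/MrSago/Python-Practice-for-Susu | lab7-10/lab7-10.py | check
-- ===== SOURCE A (Python) =====
-- alph = ['a','b','c','d','e','f','g','h','i','j','k','l','m','n','o','p','q','r','s','t','u','v','w','x','y','z']
--
-- nums = ['0','1','2','3','4','5','6','7','8','9']
--
-- def check(ls):
--     symbol = ls.pop()
--
--     if (len(ls)):
--         if (symbol in alph or symbol in nums):
--             return (True and check(ls))
--         else:
--             return (False)
--     elif (symbol in alph):
--         return (True)
--     else:
--         return (False)
-- ===== SOURCE B (Python) =====
-- def check(ls):
--     # Character-range tests instead of membership in the alph/nums tables.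
--     def letter(s):
--         return len(s) == 1 and 'a' <= s <= 'z'
--     def alnum(s):
--         return len(s) == 1 and ('a' <= s <= 'z' or '0' <= s <= '9')
--     return letter(ls[0]) and all(alnum(s) for s in ls[1:])
-- ===== Notes on version B (the rewrite author's own statement) =====
-- stated objective: simpler
-- what changed: Replaced the end-popping tail recursion with membership tests against the alph/nums list tables by a non-mutating single forward pass that classifies each element with a one-character code-point range test ('a'<=s<='z', '0'<=s<='9'); return value only, B does not empty the list as A does.
-- outside the precondition, e.g. on check([]): A raises IndexError, B raises IndexError
import Mathlib
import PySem

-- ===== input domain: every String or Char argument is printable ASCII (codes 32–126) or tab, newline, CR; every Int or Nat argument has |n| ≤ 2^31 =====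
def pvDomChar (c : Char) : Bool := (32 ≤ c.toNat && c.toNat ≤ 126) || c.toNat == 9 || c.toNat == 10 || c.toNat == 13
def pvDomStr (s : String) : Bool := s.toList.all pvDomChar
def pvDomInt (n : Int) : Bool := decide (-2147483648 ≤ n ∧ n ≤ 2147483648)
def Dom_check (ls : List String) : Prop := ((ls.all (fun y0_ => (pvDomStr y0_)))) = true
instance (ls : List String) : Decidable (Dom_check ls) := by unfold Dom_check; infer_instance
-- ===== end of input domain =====

-- B replaces A's end-popping tail recursion over the alph/nums membership tables by a non-mutating single pass using character code-range tests; return-value equivalence only — A empties the argument list, B does not mutate it.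


-- ===== PORT A =====
def alph : List String := ["a","b","c","d","e","f","g","h","i","j","k","l","m","n","o","p","q","r","s","t","u","v","w","x","y","z"]

def nums : List String := ["0","1","2","3","4","5","6","7","8","9"]

-- ls.pop() takes the LAST element; recursion on the remaining (dropLast) list.
-- The [] case is Python's IndexError, excluded by Pre_check.
def check (ls : List String) : Bool :=
  match h : ls.getLast? with
  | none => false
  | some symbol =>
    let rest := ls.dropLast
    if rest.length ≠ 0 then
      if alph.contains symbol || nums.contains symbol then check rest else false
    else if alph.contains symbol then true else false
termination_by ls.length
decreasing_by
  have hne : ls ≠ [] := by intro hnil; simp [hnil] at h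
  simpa [List.length_dropLast] using Nat.sub_lt (List.length_pos_of_ne_nil hne) one_pos

-- ===== PORT B =====
-- "len(s) == 1 and 'a' <= s <= 'z'": a one-character string compared by code point.
def pvLetter (s : String) : Bool :=
  match s.toList with
  | [c] => 'a' ≤ c && c ≤ 'z'
  | _ => false

def pvAlnum (s : String) : Bool :=
  match s.toList with
  | [c] => ('a' ≤ c && c ≤ 'z') || ('0' ≤ c && c ≤ '9')
  | _ => false

def check_alt (ls : List String) : Bool :=
  match ls with
  | [] => false  -- Python IndexError on ls[0], excluded by Pre_check
  | first :: rest => pvLetter first && rest.all pvAlnum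

-- ===== PRECONDITION & SPEC =====
-- A raises IndexError (pop from empty list) on []; both programs raise there.
def Pre_check (ls : List String) : Prop := ls ≠ []
instance (ls : List String) : Decidable (Pre_check ls) := by unfold Pre_check; infer_instance
def pvWitness_check : List String := ["a", "1"]
def Spec_check (ls : List String) (out : Bool) : Prop := out = check_alt ls
instance (ls : List String) (out : Bool) : Decidable (Spec_check ls out) := by unfold Spec_check; infer_instance

-- ===== CLAIM (what is proved, stated in full; the proofs are below) =====
def Claim_equal_check : Prop := ∀ (ls : List String), Dom_check ls → Pre_check ls → Spec_check ls (check ls)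

-- ===== LEMMAS AND PROOFS =====

theorem contains_alph (s : String) : decide (s ∈ alph) = pvLetter s := by
  unfold pvLetter
  match h : s.toList with
  | [] =>
    have hs : s = "" := String.toList_inj.mp h
    subst hs; decide
  | [c] =>
    have hs : s = String.ofList [c] := String.toList_inj.mp (by simpa using h)
    subst hs
    simp only [alph, List.mem_cons, List.not_mem_nil, or_false, String.ext_iff,
      String.toList_ofList, show ("a").toList = ['a'] from rfl, show ("b").toList = ['b'] from rfl, show ("c").toList = ['c'] from rfl, show ("d").toList = ['d'] from rfl, show ("e").toList = ['e'] from rfl, show ("f").toList = ['f'] from rfl, show ("g").toList = ['g'] from rfl, show ("h").toList = ['h'] from rfl, show ("i").toList = ['i'] from rfl, show ("j").toList = ['j'] from rfl, show ("k").toList = ['k'] from rfl, show ("l").toList = ['l'] from rfl, show ("m").toList = ['m'] from rfl, show ("n").toList = ['n'] from rfl, show ("o").toList = ['o'] from rfl, show ("p").toList = ['p'] from rfl, show ("q").toList = ['q'] from rfl, show ("r").toList = ['r'] from rfl, show ("s").toList = ['s'] from rfl, show ("t").toList = ['t'] from rfl, show ("u").toList = ['u'] from rfl, show ("v").toList = ['v']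 from rfl, show ("w").toList = ['w'] from rfl, show ("x").toList = ['x'] from rfl, show ("y").toList = ['y'] from rfl, show ("z").toList = ['z'] from rfl, List.cons.injEq, and_true]
    show _ = ('a' ≤ c && c ≤ 'z')
    rw [← Bool.decide_and, decide_eq_decide]
    simp only [Char.ext_iff, Char.le_def, UInt32.ext_iff, UInt32.le_iff_toNat_le]
    simp only [show ('a').val.toNat = 97 from rfl, show ('b').val.toNat = 98 from rfl, show ('c').val.toNat = 99 from rfl, show ('d').val.toNat = 100 from rfl, show ('e').val.toNat = 101 from rfl, show ('f').val.toNat = 102 from rfl, show ('g').val.toNat = 103 from rfl, show ('h').val.toNat = 104 from rfl, show ('i').val.toNat = 105 from rfl, show ('j').val.toNat = 106 from rfl, show ('k').val.toNat = 107 from rfl, show ('l').val.toNat = 108 from rfl, show ('m').val.toNat = 109 from rfl, show ('n').val.toNat = 110 from rfl, show ('o').val.toNat = 111 from rfl, show ('p').val.toNat = 112 from rfl, show ('q').val.toNat = 113 from rfl, show ('r').val.toNat = 114 from rfl, show ('s').val.toNat = 115 from rfl, show ('t').val.toNat = 116 from rfl, show ('u').val.toNat = 117 from rfl, show ('v').val.toNat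 = 118 from rfl, show ('w').val.toNat = 119 from rfl, show ('x').val.toNat = 120 from rfl, show ('y').val.toNat = 121 from rfl, show ('z').val.toNat = 122 from rfl]
    omega
  | a :: b :: t =>
    have hs : s = String.ofList (a :: b :: t) := String.toList_inj.mp (by simpa using h)
    subst hs
    simp [alph, String.ext_iff]

theorem contains_alnum (s : String) :
    (decide (s ∈ alph) || decide (s ∈ nums)) = pvAlnum s := by
  unfold pvAlnum
  match h : s.toList with
  | [] =>
    have hs : s = "" := String.toList_inj.mp h
    subst hs; decide
  | [c] =>
    have hs : s = String.ofList [c] := String.toList_inj.mp (by simpa using h)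
    subst hs
    simp only [alph, nums, List.mem_cons, List.not_mem_nil, or_false, String.ext_iff,
      String.toList_ofList, show ("a").toList = ['a'] from rfl, show ("b").toList = ['b'] from rfl, show ("c").toList = ['c'] from rfl, show ("d").toList = ['d'] from rfl, show ("e").toList = ['e'] from rfl, show ("f").toList = ['f'] from rfl, show ("g").toList = ['g'] from rfl, show ("h").toList = ['h'] from rfl, show ("i").toList = ['i'] from rfl, show ("j").toList = ['j'] from rfl, show ("k").toList = ['k'] from rfl, show ("l").toList = ['l'] from rfl, show ("m").toList = ['m'] from rfl, show ("n").toList = ['n'] from rfl, show ("o").toList = ['o'] from rfl, show ("p").toList = ['p'] from rfl, show ("q").toList = ['q'] from rfl, show ("r").toList = ['r'] from rfl, show ("s").toList = ['s'] from rfl, show ("t").toList = ['t'] from rfl, show ("u").toList = ['u'] from rfl, show ("v").toList = ['v'] from rfl, show ("w").toList = ['w'] from rfl, show ("x").toList = ['x'] from rfl, show ("y").toList = ['y'] from rfl, show ("z").toList = ['z'] from rfl, show ("0").toList = ['0'] from rfl, show ("1").toList = ['1'] from rfl, show ("2").toList = ['2'] from rfl, show ("3").toList = ['3'] from rfl, show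 ("4").toList = ['4'] from rfl, show ("5").toList = ['5'] from rfl, show ("6").toList = ['6'] from rfl, show ("7").toList = ['7'] from rfl, show ("8").toList = ['8'] from rfl, show ("9").toList = ['9'] from rfl, List.cons.injEq, and_true, ← Bool.decide_or]
    show _ = (('a' ≤ c && c ≤ 'z') || ('0' ≤ c && c ≤ '9'))
    rw [← Bool.decide_and, ← Bool.decide_and, ← Bool.decide_or, decide_eq_decide]
    simp only [Char.ext_iff, Char.le_def, UInt32.ext_iff, UInt32.le_iff_toNat_le]
    simp only [show ('a').val.toNat = 97 from rfl, show ('b').val.toNat = 98 from rfl, show ('c').val.toNat = 99 from rfl, show ('d').val.toNat = 100 from rfl, show ('e').val.toNat = 101 from rfl, show ('f').val.toNat = 102 from rfl, show ('g').val.toNat = 103 from rfl, show ('h').val.toNat = 104 from rfl, show ('i').val.toNat = 105 from rfl, show ('j').val.toNat = 106 from rfl, show ('k').val.toNat = 107 from rfl, show ('l').val.toNat = 108 from rfl, show ('m').val.toNat = 109 from rfl, show ('n').val.toNat = 110 from rfl, show ('o').val.toNat = 111 from rfl, show ('p').val.toNat = 112 from rfl, show ('q').val.toNat = 113 from rfl,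 show ('r').val.toNat = 114 from rfl, show ('s').val.toNat = 115 from rfl, show ('t').val.toNat = 116 from rfl, show ('u').val.toNat = 117 from rfl, show ('v').val.toNat = 118 from rfl, show ('w').val.toNat = 119 from rfl, show ('x').val.toNat = 120 from rfl, show ('y').val.toNat = 121 from rfl, show ('z').val.toNat = 122 from rfl, show ('0').val.toNat = 48 from rfl, show ('1').val.toNat = 49 from rfl, show ('2').val.toNat = 50 from rfl, show ('3').val.toNat = 51 from rfl, show ('4').val.toNat = 52 from rfl, show ('5').val.toNat = 53 from rfl, show ('6').val.toNat = 54 from rfl, show ('7').val.toNat = 55 from rfl, show ('8').val.toNat = 56 from rfl, show ('9').val.toNat = 57 from rfl]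
    omega
  | a :: b :: t =>
    have hs : s = String.ofList (a :: b :: t) := String.toList_inj.mp (by simpa using h)
    subst hs
    simp [alph, nums, String.ext_iff]

theorem check_cons (first : String) (rest : List String) :
    check (first :: rest) = (pvLetter first && rest.all pvAlnum) := by
  induction rest using List.reverseRecOn with
  | nil => simp [check, List.contains_eq_mem, contains_alph]
  | append_singleton rest' x ih =>
    rw [check]
    split
    · rename_i h
      simp at h
    · rename_i symbol h
      have hx : symbol = x := by
        simp only [← List.cons_append, List.getLast?_concat] at h
        exact (Option.some.inj h).symm
      subst hx
      simp only [← List.cons_append, List.dropLast_concat]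
      have hm : (alph.contains symbol || nums.contains symbol) = pvAlnum symbol := by
        simpa [List.contains_eq_mem] using contains_alnum symbol
      by_cases hs : pvAlnum symbol = true
      · rw [hm, hs]
        simp [ih, hs]
      · rw [Bool.not_eq_true] at hs
        rw [hm, hs]
        simp [hs]

-- ===== VERDICT (by name: the statement is the Claim_ definition above) =====
theorem check_spec : Claim_equal_check := by
  intro ls _ hpre
  match ls with
  | [] => exact absurd rfl hpre
  | first :: rest =>
    show check (first :: rest) = check_alt (first :: rest)
    rw [check_cons]; rfl
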